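-- pv_equiv track=rewrite | github.com/nastiapetrovych/university_labs | game/player1.py | filter_extreme_points
-- ===== SOURCE A (Python) =====
-- def convert_str_field_into_list(field: str) -> list:
--     return [[val for val in row] for row in field.lower().split("\n")]
--
-- def filter_extreme_points(field: str, points: list) -> list:
--     field = convert_str_field_into_list(field)
--     available_points = []
--
--     for x, y in points:
--         neighbors = []
--         for i, j in [(x-1, y), (x+1, y), (x, y-1), (x, y+1)]:
--             try:
--                 if i >= 0 and j >= 0:
--                     neighbors.append(field[i][j])
--             except IndexError:
--                 pass
--
--         if neighbors.count(".") > 0: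
--             available_points.append((x, y))
--
--     return available_points
-- ===== SOURCE B (Python) =====
-- def filter_extreme_points(field: str, points: list) -> list:
--     near = set()
--     for i, row in enumerate(field.lower().split("\n")):
--         for j, ch in enumerate(row):
--             if ch == ".":
--                 near.update(((i - 1, j), (i + 1, j), (i, j - 1), (i, j + 1)))
--     return [(x, y) for x, y in points if (x, y) in near]
-- ===== Notes on version B (the rewrite author's own statement) =====
-- stated objective: alternative
-- what changed: Inverts A's per-point four-neighbor grid probing into a one-pass dilation: scan the grid once collecting every coordinate adjacent to a '.' into a set, then filter the points by set membership.
import Mathlib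
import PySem

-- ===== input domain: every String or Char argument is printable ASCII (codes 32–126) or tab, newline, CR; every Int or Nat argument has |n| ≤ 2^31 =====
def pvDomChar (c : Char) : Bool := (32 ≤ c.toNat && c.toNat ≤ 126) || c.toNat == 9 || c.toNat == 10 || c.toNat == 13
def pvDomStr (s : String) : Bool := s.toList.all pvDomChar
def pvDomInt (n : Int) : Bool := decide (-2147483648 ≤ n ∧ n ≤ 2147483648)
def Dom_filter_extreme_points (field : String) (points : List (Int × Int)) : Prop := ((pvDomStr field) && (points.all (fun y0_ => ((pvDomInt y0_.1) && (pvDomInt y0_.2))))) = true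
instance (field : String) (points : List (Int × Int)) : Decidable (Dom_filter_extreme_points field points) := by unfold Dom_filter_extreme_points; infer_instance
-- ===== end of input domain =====

-- B replaces A's per-point four-neighbor grid probing by a one-pass dilation: collect every
-- coordinate adjacent to a '.' into a set, then filter the points by set membership (objective: alternative traversal).


-- ===== PORT A =====
def convert_str_field_into_list (field : String) : List (List Char) :=
  ((PySem.Str.lower field).splitOn "\n").map String.toList

def filter_extreme_points (field : String) (points : List (Int × Int)) : List (Int × Int) :=
  let grid := convert_str_field_into_list field
  points.foldl (fun acc p =>
    let x := p.1; let y := p.2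
    let neighbors := [(x-1,y),(x+1,y),(x,y-1),(x,y+1)].foldl (fun ns q =>
      if q.1 ≥ 0 ∧ q.2 ≥ 0 then
        -- try/except IndexError: pyGet? = none is exactly Python's IndexError, caught → skip
        match PySem.List.pyGet? grid q.1 with
        | some row =>
          match PySem.List.pyGet? row q.2 with
          | some c => ns ++ [c]
          | none => ns
        | none => ns
      else ns) ([] : List Char)
    if neighbors.count '.' > 0 then acc ++ [(x, y)] else acc) []

-- ===== PORT B =====
def neighbors4 (i j : Int) : List (Int × Int) := [(i-1,j),(i+1,j),(i,j-1),(i,j+1)]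

def filter_extreme_points_alt (field : String) (points : List (Int × Int)) : List (Int × Int) :=
  let grid := ((PySem.Str.lower field).splitOn "\n").map String.toList
  let near := (PySem.List.enumerate grid 0).foldl (fun s q =>
      (PySem.List.enumerate q.2 0).foldl (fun s' r =>
        if r.2 == '.' then PySem.Set.update s' (neighbors4 q.1 r.1) else s') s)
    (PySem.Set.empty : PySem.Set (Int × Int))
  points.filter (fun p => PySem.Set.contains near p)

-- ===== PRECONDITION & SPEC =====
def Spec_filter_extreme_points (field : String) (points : List (Int × Int)) (out : List (Int × Int)) : Prop := out = filter_extreme_points_alt field points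
instance (field : String) (points : List (Int × Int)) (out : List (Int × Int)) : Decidable (Spec_filter_extreme_points field points out) := by unfold Spec_filter_extreme_points; infer_instance

-- ===== CLAIM (what is proved, stated in full; the proofs are below) =====
def Claim_equal_filter_extreme_points : Prop := ∀ (field : String) (points : List (Int × Int)), Dom_filter_extreme_points field points → Spec_filter_extreme_points field points (filter_extreme_points field points)

-- ===== LEMMAS AND PROOFS =====

-- a '.' sits at cell (i, j) of the grid (nonnegative, in-range indices)
def isDotAt (grid : List (List Char)) (i j : Int) : Prop :=
  0 ≤ i ∧ 0 ≤ j ∧ ∃ row, PySem.List.pyGet? grid i = some row ∧ PySem.List.pyGet? row j = some '.'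

-- membership in a foldl whose step adds exactly the elements described by P
theorem mem_foldl_of_step {α β : Type} (g : List α → β → List α) (P : β → α → Prop)
    (hg : ∀ s b x, x ∈ g s b ↔ x ∈ s ∨ P b x) (l : List β) (s : List α) (x : α) :
    x ∈ l.foldl g s ↔ x ∈ s ∨ ∃ b ∈ l, P b x := by
  induction l generalizing s with
  | nil => simp
  | cons b l ih => simp [List.foldl_cons, ih, hg]; tauto

-- the neighbor relation is symmetric
theorem mem_sym (i j x y : Int) : (i, j) ∈ neighbors4 x y ↔ (x, y) ∈ neighbors4 i j := by
  simp [neighbors4, Prod.ext_iff]; omega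

-- B's dilation set holds exactly the coordinates adjacent to a dot cell
theorem mem_near (grid : List (List Char)) (p : Int × Int) :
    p ∈ (PySem.List.enumerate grid 0).foldl (fun s q =>
      (PySem.List.enumerate q.2 0).foldl (fun s' r =>
        if r.2 == '.' then PySem.Set.update s' (neighbors4 q.1 r.1) else s') s)
      (PySem.Set.empty : PySem.Set (Int × Int))
    ↔ ∃ i j, isDotAt grid i j ∧ p ∈ neighbors4 i j := by
  rw [mem_foldl_of_step _ (fun q x => ∃ r ∈ PySem.List.enumerate q.2 0, r.2 = '.' ∧ x ∈ neighbors4 q.1 r.1)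
    (fun s q x => by
      rw [mem_foldl_of_step _ (fun r x => r.2 = '.' ∧ x ∈ neighbors4 q.1 r.1)
        (fun s' r x => by
          by_cases h : r.2 = '.' <;> simp [h])])]
  constructor
  · rintro (h | ⟨q, hq, r, hr, hdot, hmem⟩)
    · simp [PySem.Set.empty] at h
    · rw [PySem.List.mem_enumerate_iff] at hq hr
      obtain ⟨k, hk, rfl⟩ := hq
      obtain ⟨m, hm, rfl⟩ := hr
      simp only at hdot hmem
      have hm' : m < grid[k].length := by simpa using hm
      exact ⟨(k : Int), (m : Int), ⟨by positivity, by positivity,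
        grid[k], by simp, by simp [List.getElem?_eq_getElem hm', hdot]⟩, by simpa using hmem⟩
  · rintro ⟨i, j, ⟨hi, hj, row, hrow, hc⟩, hmem⟩
    right
    rw [PySem.List.pyGet?_of_nonneg _ hi] at hrow
    rw [PySem.List.pyGet?_of_nonneg _ hj] at hc
    rw [List.getElem?_eq_some_iff] at hrow hc
    obtain ⟨hk, rfl⟩ := hrow
    obtain ⟨hm, hc⟩ := hc
    refine ⟨(i.toNat, grid[i.toNat]), ?_, (j.toNat, grid[i.toNat][j.toNat]), ?_, hc, ?_⟩
    · rw [PySem.List.mem_enumerate_iff]; exact ⟨i.toNat, hk, by simp⟩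
    · rw [PySem.List.mem_enumerate_iff]; exact ⟨j.toNat, hm, by simp⟩
    · simpa [Int.toNat_of_nonneg hi, Int.toNat_of_nonneg hj] using hmem

-- A's inner four-neighbor probe finds a '.' iff some neighbor cell is a dot
theorem count_neighbors (grid : List (List Char)) (x y : Int) :
    (([(x-1,y),(x+1,y),(x,y-1),(x,y+1)] : List (Int × Int)).foldl (fun ns q =>
      if q.1 ≥ 0 ∧ q.2 ≥ 0 then
        match PySem.List.pyGet? grid q.1 with
        | some row =>
          match PySem.List.pyGet? row q.2 with
          | some c => ns ++ [c]
          | none => ns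
        | none => ns
      else ns) ([] : List Char)).count '.' > 0
    ↔ ∃ q ∈ neighbors4 x y, isDotAt grid q.1 q.2 := by
  rw [gt_iff_lt, List.count_pos_iff,
    mem_foldl_of_step _ (fun (q : Int × Int) (c : Char) =>
      (q.1 ≥ 0 ∧ q.2 ≥ 0) ∧ ∃ row, PySem.List.pyGet? grid q.1 = some row ∧ PySem.List.pyGet? row q.2 = some c)
    (fun s q c => by
      split_ifs with h
      · cases hrow : PySem.List.pyGet? grid q.1 with
        | none => simp [h, hrow]
        | some row => cases hcell : PySem.List.pyGet? row q.2 with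
          | none => simp [h, hrow, hcell]
          | some c' => simp [h, hrow, hcell, eq_comm]
      · simp [h])]
  simp only [neighbors4, isDotAt, ge_iff_le, and_assoc, List.not_mem_nil, false_or]

-- A's foldl-append loop over the points is a filter
theorem foldl_eq_filter (grid : List (List Char)) (near : PySem.Set (Int × Int))
    (hnear : ∀ p : Int × Int, p ∈ near ↔ ∃ i j, isDotAt grid i j ∧ p ∈ neighbors4 i j)
    (points acc : List (Int × Int)) :
    points.foldl (fun acc p =>
      let x := p.1; let y := p.2
      let neighbors := [(x-1,y),(x+1,y),(x,y-1),(x,y+1)].foldl (fun ns q =>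
        if q.1 ≥ 0 ∧ q.2 ≥ 0 then
          match PySem.List.pyGet? grid q.1 with
          | some row =>
            match PySem.List.pyGet? row q.2 with
            | some c => ns ++ [c]
            | none => ns
          | none => ns
        else ns) ([] : List Char)
      if neighbors.count '.' > 0 then acc ++ [(x, y)] else acc) acc
    = acc ++ points.filter (fun p => PySem.Set.contains near p) := by
  induction points generalizing acc with
  | nil => simp
  | cons p points ih =>
    have hpt : (PySem.Set.contains near p = true) ↔
        ∃ q ∈ neighbors4 p.1 p.2, isDotAt grid q.1 q.2 := by
      rw [PySem.Set.contains_iff, hnear]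
      constructor
      · rintro ⟨i, j, hd, hm⟩
        exact ⟨(i, j), by rw [mem_sym]; simpa [Prod.mk.eta] using hm, hd⟩
      · rintro ⟨q, hq, hd⟩
        exact ⟨q.1, q.2, hd, by rw [← mem_sym]; simpa [Prod.mk.eta] using hq⟩
    rw [List.foldl_cons, ih, List.filter_cons]
    simp only []
    by_cases hc : PySem.Set.contains near p = true
    · rw [if_pos ((count_neighbors grid p.1 p.2).mpr (hpt.mp hc)), hc]
      simp
    · rw [if_neg (fun h => hc (hpt.mpr ((count_neighbors grid p.1 p.2).mp h)))]
      simp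
      exact fun hm => hc (by rw [PySem.Set.contains_iff]; exact hm)

-- ===== VERDICT (by name: the statement is the Claim_ definition above) =====
theorem filter_extreme_points_spec : Claim_equal_filter_extreme_points := by
  intro field points _
  unfold Spec_filter_extreme_points filter_extreme_points filter_extreme_points_alt convert_str_field_into_list
  rw [foldl_eq_filter _ _ (fun p => mem_near _ p)]
  simp
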